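-- pv_equiv track=rewrite | github.com/ProkopHapala/FireCore | scripts/xyz_simplify_symbols.py | iterate_frames
-- ===== SOURCE A (Python) =====
-- from typing import Iterable, Tuple, List, Optional
--
-- def parse_int_token(s: str) -> Optional[int]:
--     """Parse an integer from a line that is expected to be the atom count.
--     Returns None if parsing fails."""
--     try:
--         return int(s.strip())
--     except Exception:
--         return None
--
-- def iterate_frames(instream: Iterable[str]) -> Iterable[Tuple[str, str, List[str]]]:
--     """Yield XYZ frames as (count_line, comment_line, atom_lines).
--
--     - Preserves lines exactly as read
--     - Attempts to follow the conventional order: count line, comment line, N atom lines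
--     - If structure is inconsistent, it will try to resynchronize by scanning forward
--     """
--     it = iter(instream)
--     for line in it:
--         # Seek count line
--         n = parse_int_token(line)
--         if n is None:
--             # Not a valid frame start, skip this line (write responsibility is with caller)
--             continue
--         count_line = line
--         # Expect comment line next; if EOF, yield incomplete frame conservatively
--         try:
--             comment_line = next(it)
--         except StopIteration:
--             yield count_line, "", []
--             break
--         # Collect atom lines
--         atoms: List[str] = []
--         for _ in range(n):
--             try:
--                 atoms.append(next(it))
--             except StopIteration:
--                 # Incomplete frame; yield what we have
--                 break
--         yield count_line, comment_line, atoms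
-- ===== SOURCE B (Python) =====
-- from typing import Iterable, Tuple, List, Optional
--
-- def parse_int_token(s: str) -> Optional[int]:
--     try:
--         return int(s.strip())
--     except Exception:
--         return None
--
-- def iterate_frames(instream: Iterable[str]) -> Iterable[Tuple[str, str, List[str]]]:
--     """Single flat loop with an explicit parser state machine (seek / comment / atoms)."""
--     SEEK, COMMENT, ATOMS = 0, 1, 2
--     state = SEEK
--     count_line = ""
--     comment_line = ""
--     remaining = 0
--     atoms: List[str] = []
--     for line in instream:
--         if state == SEEK:
--             n = parse_int_token(line)
--             if n is not None:
--                 count_line = line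
--                 remaining = n
--                 state = COMMENT
--         elif state == COMMENT:
--             comment_line = line
--             if remaining <= 0:
--                 yield count_line, comment_line, []
--                 state = SEEK
--             else:
--                 atoms = []
--                 state = ATOMS
--         else:
--             atoms.append(line)
--             remaining -= 1
--             if remaining <= 0:
--                 yield count_line, comment_line, atoms
--                 state = SEEK
--     if state == COMMENT:
--         yield count_line, "", []
--     elif state == ATOMS:
--         yield count_line, comment_line, atoms
-- ===== Notes on version B (the rewrite author's own statement) =====
-- stated objective: alternative
-- what changed: Replaced A's nested next()-driven loops (inner comment fetch and range(n) atom loop inside the outer scan) by one flat loop over the stream driving an explicit three-state parser (seeking / expecting comment / collecting atoms) with a remaining counter, flushing a trailing partial frame after the loop.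
import Mathlib
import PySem

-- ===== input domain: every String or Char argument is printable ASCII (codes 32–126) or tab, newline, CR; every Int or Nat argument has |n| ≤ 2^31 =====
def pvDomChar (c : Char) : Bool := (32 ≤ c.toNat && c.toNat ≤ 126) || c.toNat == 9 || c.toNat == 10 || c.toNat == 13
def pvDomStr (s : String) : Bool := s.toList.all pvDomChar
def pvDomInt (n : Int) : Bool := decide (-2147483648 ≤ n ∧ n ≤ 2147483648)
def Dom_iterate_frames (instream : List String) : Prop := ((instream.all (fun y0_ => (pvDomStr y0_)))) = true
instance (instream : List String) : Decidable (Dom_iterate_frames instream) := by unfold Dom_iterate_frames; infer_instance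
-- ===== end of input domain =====

-- B is an alternative decomposition: one flat loop with an explicit 3-state parser
-- instead of A's nested next()-driven loops; same cost, return value proved equal.

-- ===== PORT A =====
-- int(s.strip()), None on failure
def parse_int_token (s : String) : Option Int := PySem.Int.ofStr? (PySem.Str.strip s)

-- inner 'for _ in range(n): atoms.append(next(it))' loop: collects up to n lines,
-- stops early at end of stream; returns (atoms, rest of stream)
def pvTakeAtoms (n : Int) (l : List String) : List String × List String :=
  if n ≤ 0 then ([], l)
  else
    match l with
    | [] => ([], [])
    | x :: xs =>
      let p := pvTakeAtoms (n - 1) xs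
      (x :: p.1, p.2)
  termination_by structural l

-- needed by iterate_frames' termination argument
theorem pvTakeAtoms_len (n : Int) (l : List String) :
    (pvTakeAtoms n l).2.length ≤ l.length := by
  induction l generalizing n with
  | nil => unfold pvTakeAtoms; split <;> simp
  | cons x xs ih =>
    unfold pvTakeAtoms; split
    · simp
    · have := ih (n - 1); simp; omega

set_option maxHeartbeats 1000000 in
def iterate_frames (instream : List String) : List (String × String × List String) :=
  match instream with
  | [] => []
  | line :: rest =>
    match parse_int_token line with
    | none => iterate_frames rest
    | some n =>
      match rest with
      | [] => [(line, "", [])]          -- EOF while expecting the comment line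
      | comment :: rest2 =>
        let p := pvTakeAtoms n rest2
        (line, comment, p.1) :: iterate_frames p.2
  termination_by instream.length
  decreasing_by
  · simp only [List.length_cons]; omega
  · have := pvTakeAtoms_len n rest2; simp only [List.length_cons]; omega

-- ===== PORT B =====
inductive PvState where
  | seek : PvState
  | comment (count_line : String) (remaining : Int) : PvState
  | atoms (count_line comment_line : String) (acc : List String) (remaining : Int) : PvState
deriving DecidableEq, Repr

-- the flat 'for line in instream' loop of B, carrying the parser state;
-- the branches of the [] case are B's after-loop flush of a partial frame
def pvRunB (instream : List String) (st : PvState) : List (String × String × List String) :=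
  match instream with
  | [] =>
    match st with
    | .seek => []
    | .comment cl _ => [(cl, "", [])]
    | .atoms cl c acc _ => [(cl, c, acc)]
  | line :: rest =>
    match st with
    | .seek =>
      match parse_int_token line with
      | none => pvRunB rest .seek
      | some n => pvRunB rest (.comment line n)
    | .comment cl rem =>
      if rem ≤ 0 then (cl, line, []) :: pvRunB rest .seek
      else pvRunB rest (.atoms cl line [] rem)
    | .atoms cl c acc rem =>
      if rem - 1 ≤ 0 then (cl, c, acc ++ [line]) :: pvRunB rest .seek
      else pvRunB rest (.atoms cl c (acc ++ [line]) (rem - 1))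

def iterate_frames_alt (instream : List String) : List (String × String × List String) :=
  pvRunB instream .seek

-- ===== PRECONDITION & SPEC =====
def Spec_iterate_frames (instream : List String) (out : List (String × String × List String)) : Prop := out = iterate_frames_alt instream
instance (instream : List String) (out : List (String × String × List String)) : Decidable (Spec_iterate_frames instream out) := by unfold Spec_iterate_frames; infer_instance

-- ===== CLAIM (what is proved, stated in full; the proofs are below) =====
def Claim_equal_iterate_frames : Prop := ∀ (instream : List String), Dom_iterate_frames instream → Spec_iterate_frames instream (iterate_frames instream)

-- ===== LEMMAS AND PROOFS =====

-- running B's atom-collecting state equals A's inner-loop result followed by seeking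
theorem pvRunB_atoms (l : List String) : ∀ (acc : List String) (rem : Int) (cl c : String),
    0 < rem →
    pvRunB l (.atoms cl c acc rem)
      = (cl, c, acc ++ (pvTakeAtoms rem l).1) :: iterate_frames_alt (pvTakeAtoms rem l).2 := by
  induction l with
  | nil =>
    intro acc rem cl c h
    unfold pvTakeAtoms
    simp [pvRunB, iterate_frames_alt, not_le.mpr h]
  | cons x xs ih =>
    intro acc rem cl c h
    unfold pvTakeAtoms
    rw [if_neg (not_le.mpr h)]
    by_cases h1 : rem - 1 ≤ 0
    · have h2 : pvTakeAtoms (rem - 1) xs = ([], xs) := by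
        unfold pvTakeAtoms; rw [if_pos h1]
      simp [pvRunB, h1, h2, iterate_frames_alt]
    · simp only [pvRunB, if_neg h1]
      rw [ih (acc ++ [x]) (rem - 1) cl c (by omega)]
      simp

theorem pvMain : ∀ (fuel : Nat) (l : List String), l.length ≤ fuel →
    iterate_frames l = iterate_frames_alt l := by
  intro fuel
  induction fuel with
  | zero =>
    intro l h
    have : l = [] := by cases l <;> simp_all
    subst this
    simp [iterate_frames, iterate_frames_alt, pvRunB]
  | succ k ih =>
    intro l h
    match l with
    | [] => simp [iterate_frames, iterate_frames_alt, pvRunB]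
    | line :: rest =>
      rw [iterate_frames]
      cases hp : parse_int_token line with
      | none =>
        simp only [iterate_frames_alt, pvRunB, hp]
        exact ih rest (by simp at h; omega)
      | some n =>
        match rest with
        | [] => simp [iterate_frames_alt, pvRunB, hp]
        | comment :: rest2 =>
          simp only [iterate_frames_alt, pvRunB, hp]
          by_cases hn : n ≤ 0
          · have h2 : pvTakeAtoms n rest2 = ([], rest2) := by
              unfold pvTakeAtoms; rw [if_pos hn]
            rw [if_pos hn, h2]
            have := ih rest2 (by simp at h; omega)
            simp only [iterate_frames_alt] at this
            simp [this]
          · rw [if_neg hn, pvRunB_atoms rest2 [] n line comment (by omega)]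
            simp only [List.nil_append]
            have hlen := pvTakeAtoms_len n rest2
            rw [ih _ (by simp at h; omega)]

-- ===== VERDICT (by name: the statement is the Claim_ definition above) =====
theorem iterate_frames_spec : Claim_equal_iterate_frames := by
  intro l _
  unfold Spec_iterate_frames
  exact pvMain l.length l le_rfl
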